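-- pv_equiv track=rewrite | github.com/bekhzod91/edenbase | eden/core/commands.py | __simple_command
-- ===== SOURCE A (Python) =====
-- def __simple_command(command_args):
--     """
--     Console simple command example("command.py simple_command ")
--     :return: dict
--     """
--     simple_command = []
--     # Without first command
--     command_args = command_args[1:]
--     before_command_is_not_simple = False
--
--     for command_arg in command_args:
--         if not before_command_is_not_simple and '-' != command_arg[:1]:
--             simple_command.append(command_arg)
--         else:
--             # As this command is not simple
--             # next command is current command value, so skip this command
--             before_command_is_not_simple = not before_command_is_not_simple
--
--     return simple_command
-- ===== SOURCE B (Python) =====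
-- def __simple_command(command_args):
--     args = command_args[1:]
--     simple_command = []
--     i = 0
--     while i < len(args):
--         if args[i][:1] == '-':
--             # flag: skip it and its value unconditionally
--             i += 2
--         else:
--             simple_command.append(args[i])
--             i += 1
--     return simple_command
-- ===== Notes on version B (the rewrite author's own statement) =====
-- stated objective: simpler
-- what changed: Replaces the for-loop with a parity-toggle boolean by an explicit index-driven while loop that appends positional args and jumps i+=2 over a flag and its value.
import Mathlib
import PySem

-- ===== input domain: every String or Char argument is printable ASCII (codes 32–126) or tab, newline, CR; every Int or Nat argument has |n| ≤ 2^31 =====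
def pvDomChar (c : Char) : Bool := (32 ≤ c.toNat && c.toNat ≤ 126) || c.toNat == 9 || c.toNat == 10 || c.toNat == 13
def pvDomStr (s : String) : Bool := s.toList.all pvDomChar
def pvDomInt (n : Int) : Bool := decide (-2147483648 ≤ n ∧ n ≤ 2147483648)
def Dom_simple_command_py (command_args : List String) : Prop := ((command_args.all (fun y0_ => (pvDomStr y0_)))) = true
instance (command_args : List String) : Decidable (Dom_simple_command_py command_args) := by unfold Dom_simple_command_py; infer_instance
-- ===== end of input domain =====

-- B replaces A's for-loop with a parity-toggle boolean by an index-skipping while loop (simpler decomposition, same O(n) cost).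


-- ===== PORT A =====
-- one step of A's for-loop over state (simple_command, before_command_is_not_simple)
def pvStepA (s : List String × Bool) (command_arg : String) : List String × Bool :=
  if s.2 = false ∧ "-" ≠ PySem.Str.slice command_arg none (some 1) then
    (s.1 ++ [command_arg], s.2)
  else
    (s.1, !s.2)

def simple_command_py (command_args : List String) : List String :=
  ((PySem.List.slice command_args (some 1) none).foldl pvStepA ([], false)).1

-- ===== PORT B =====
-- B's while-loop over an index i: recursion on the suffix args[i:]; a flag drops itself and its value (i += 2)
def pvGoB : List String → List String
  | [] => []
  | a :: rest =>
    if PySem.Str.slice a none (some 1) = "-" then pvGoB (rest.drop 1)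
    else a :: pvGoB rest
termination_by args => args.length
decreasing_by
  all_goals simp

def simple_command_py_alt (command_args : List String) : List String :=
  pvGoB (PySem.List.slice command_args (some 1) none)

-- ===== PRECONDITION & SPEC =====
def Spec_simple_command_py (command_args : List String) (out : List String) : Prop := out = simple_command_py_alt command_args
instance (command_args : List String) (out : List String) : Decidable (Spec_simple_command_py command_args out) := by unfold Spec_simple_command_py; infer_instance

-- ===== CLAIM (what is proved, stated in full; the proofs are below) =====
def Claim_equal_simple_command_py : Prop := ∀ (command_args : List String), Dom_simple_command_py command_args → Spec_simple_command_py command_args (simple_command_py command_args)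

-- ===== LEMMAS AND PROOFS =====
-- loop invariant: A's fold from (acc, false) produces acc ++ B's skip-by-two result
theorem pvMain (l : List String) (acc : List String) :
    (l.foldl pvStepA (acc, false)).1 = acc ++ pvGoB l := by
  match l with
  | [] => simp [pvGoB]
  | a :: rest =>
    by_cases h : PySem.Str.slice a none (some 1) = "-"
    · -- flag: A toggles to true; the next element (if any) just toggles it back
      rw [pvGoB, if_pos h]
      cases rest with
      | nil => simp [pvStepA, h.symm, pvGoB]
      | cons b rest' =>
        have ih := pvMain rest' acc
        simpa [pvStepA, h.symm] using ih
    · -- positional: both append a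
      rw [pvGoB, if_neg h]
      have h' : "-" ≠ PySem.Str.slice a none (some 1) := fun e => h e.symm
      have ih := pvMain rest (acc ++ [a])
      simpa [pvStepA, h'] using ih
termination_by l.length
decreasing_by
  all_goals simp

-- ===== VERDICT (by name: the statement is the Claim_ definition above) =====
theorem simple_command_py_spec : Claim_equal_simple_command_py := by
  intro command_args _
  unfold Spec_simple_command_py simple_command_py simple_command_py_alt
  simpa using pvMain (PySem.List.slice command_args (some 1) none) []
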